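-- pv_equiv track=rewrite | github.com/greateden/Verlan-Identification-Normalisation | src/detect_infer.py | has_fuzzy_verlan
-- ===== SOURCE A (Python) =====
-- def one_edit_apart(a: str, b: str) -> bool:
--     """
--     Cheap check for edit distance <= 1.
--     We early-exit and avoid full DP for speed; fine for short tokens and small lexicons.
--     """
--     la, lb = len(a), len(b)
--     if abs(la - lb) > 1:
--         return False
--     # Ensure a is the shorter
--     if la > lb:
--         a, b = b, a
--         la, lb = lb, la
--     i = j = diff = 0
--     while i < la and j < lb and diff <= 1:
--         if a[i] == b[j]:
--             i += 1; j += 1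
--         else:
--             diff += 1
--             if la == lb:
--                 # substitute
--                 i += 1; j += 1
--             else:
--                 # insert/delete on the longer string
--                 j += 1
--     # account for trailing char
--     diff += (lb - j) + (la - i)
--     return diff <= 1
--
-- def has_fuzzy_verlan(tokens, vset: set, max_edit: int = 1) -> bool:
--     """
--     Gate condition:
--       - Exact hit on lexicon tokens, OR
--       - Fuzzy hit: any token within <=1 edit from a lexicon entry (length >=3).
--     This significantly raises precision by filtering look-alikes.
--     """
--     if not tokens or not vset:
--         return False
--     # Exact
--     if any(t in vset for t in tokens):
--         return True
--     # Fuzzy (only for tokens with length >= 3, to reduce spurious matches)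
--     cand_by_len = {}
--     for w in vset:
--         cand_by_len.setdefault(len(w), []).append(w)
--     for t in tokens:
--         if len(t) < 3:
--             continue
--         for L in (len(t) - 1, len(t), len(t) + 1):
--             for w in cand_by_len.get(L, []):
--                 if one_edit_apart(t, w):
--                     return True
--     return False
-- ===== SOURCE B (Python) =====
-- def _one_edit(a, b):
--     la, lb = len(a), len(b)
--     if la == lb:
--         return sum(x != y for x, y in zip(a, b)) <= 1
--     if la > lb:
--         a, b, la, lb = b, a, lb, la
--     if lb - la != 1:
--         return False
--     i = 0
--     while i < la and a[i] == b[i]: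
--         i += 1
--     return a[i:] == b[i + 1:]
--
-- def has_fuzzy_verlan(tokens, vset, max_edit=1):
--     return any(
--         t in vset or (len(t) >= 3 and any(_one_edit(t, w) for w in vset))
--         for t in tokens
--     )
-- ===== Notes on version B (the rewrite author's own statement) =====
-- stated objective: simpler
-- what changed: One pass over tokens combining the exact and fuzzy phases (no length-bucket dict built), and the <=1-edit test is a mismatch count over zip for equal lengths / common-prefix split plus suffix equality for lengths differing by one, instead of A's stateful two-pointer diff loop over 3 length buckets.
import Mathlib
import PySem

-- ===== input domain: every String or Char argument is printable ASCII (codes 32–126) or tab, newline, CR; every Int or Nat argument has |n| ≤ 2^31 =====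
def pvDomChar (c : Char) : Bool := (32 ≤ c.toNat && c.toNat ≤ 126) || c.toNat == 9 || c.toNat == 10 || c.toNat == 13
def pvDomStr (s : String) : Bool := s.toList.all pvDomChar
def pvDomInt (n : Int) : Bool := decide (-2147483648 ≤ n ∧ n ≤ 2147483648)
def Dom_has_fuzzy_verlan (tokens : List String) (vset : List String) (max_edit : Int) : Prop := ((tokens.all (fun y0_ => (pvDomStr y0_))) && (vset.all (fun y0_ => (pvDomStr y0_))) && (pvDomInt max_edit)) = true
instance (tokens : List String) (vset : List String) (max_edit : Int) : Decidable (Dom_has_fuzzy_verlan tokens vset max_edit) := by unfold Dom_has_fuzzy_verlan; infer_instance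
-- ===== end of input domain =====

-- B merges A's exact and fuzzy phases into one pass over tokens, drops the length-bucket
-- dict, and tests edit-distance ≤ 1 by mismatch-count / prefix-split instead of A's
-- two-pointer diff loop; same asymptotic cost (objective: simpler).

-- ===== PORT A =====
-- the while loop of one_edit_apart: state (i, j, diff); returns the final diff
-- (Python then adds the trailing chars and compares with 1)
def pvOELoop (a b : List Char) (la lb : Nat) (i j diff : Nat) : Nat :=
  if h : i < la ∧ j < lb ∧ diff ≤ 1 then
    if a[i]? == b[j]? then pvOELoop a b la lb (i+1) (j+1) diff
    else if la == lb then pvOELoop a b la lb (i+1) (j+1) (diff+1)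
    else pvOELoop a b la lb i (j+1) (diff+1)
  else diff + (lb - j) + (la - i)
termination_by (la - i) + (lb - j)
decreasing_by all_goals omega

def one_edit_apart (a b : String) : Bool :=
  let al := a.toList
  let bl := b.toList
  let la := al.length
  let lb := bl.length
  if ((la : Int) - (lb : Int)).natAbs > 1 then false
  else if la > lb then
    -- a, b = b, a ; la, lb = lb, la
    decide (pvOELoop bl al lb la 0 0 0 ≤ 1)
  else
    decide (pvOELoop al bl la lb 0 0 0 ≤ 1)

def has_fuzzy_verlan (tokens : List String) (vset : List String) (max_edit : Int) : Bool :=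
  if tokens.isEmpty || vset.isEmpty then false
  else if tokens.any (fun t => vset.contains t) then true
  else
    -- cand_by_len: setdefault(len(w), []).append(w)  =  modify (len w) [] (· ++ [w])
    let cand : PySem.Dict Int (List String) :=
      vset.foldl (fun d w => d.modify ((w.toList.length : Int)) [] (fun l => l ++ [w])) PySem.Dict.empty
    tokens.any (fun t =>
      if t.toList.length < 3 then false
      else
        [((t.toList.length : Int)) - 1, ((t.toList.length : Int)), ((t.toList.length : Int)) + 1].any
          (fun L => (cand.getD L []).any (fun w => one_edit_apart t w)))

-- ===== PORT B =====
-- the while loop of _one_edit after the first length checks (lb = la + 1):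
-- skip the common prefix, then a[i:] == b[i+1:]
def pvInsCheck : List Char → List Char → Bool
  | [], b => b.drop 1 == []
  | _ :: _, [] => false   -- unreachable when b is one longer than a
  | x :: a, y :: b => if x = y then pvInsCheck a b else (x :: a) == b

def pvOneEditB (a b : List Char) : Bool :=
  if a.length = b.length then
    decide (((a.zip b).countP (fun p => p.1 != p.2)) ≤ 1)
  else if a.length > b.length then
    if b.length + 1 = a.length then pvInsCheck b a else false
  else
    if a.length + 1 = b.length then pvInsCheck a b else false

def has_fuzzy_verlan_alt (tokens : List String) (vset : List String) (max_edit : Int) : Bool :=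
  tokens.any (fun t =>
    vset.contains t ||
      (decide (3 ≤ t.toList.length) && vset.any (fun w => pvOneEditB t.toList w.toList)))

-- ===== PRECONDITION & SPEC =====
def Spec_has_fuzzy_verlan (tokens : List String) (vset : List String) (max_edit : Int) (out : Bool) : Prop := out = has_fuzzy_verlan_alt tokens vset max_edit
instance (tokens : List String) (vset : List String) (max_edit : Int) (out : Bool) : Decidable (Spec_has_fuzzy_verlan tokens vset max_edit out) := by unfold Spec_has_fuzzy_verlan; infer_instance

-- ===== CLAIM (what is proved, stated in full; the proofs are below) =====
def Claim_equal_has_fuzzy_verlan : Prop := ∀ (tokens : List String) (vset : List String) (max_edit : Int), Dom_has_fuzzy_verlan tokens vset max_edit → Spec_has_fuzzy_verlan tokens vset max_edit (has_fuzzy_verlan tokens vset max_edit)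

-- ===== LEMMAS AND PROOFS =====

-- equal-length phase of A's loop: the truth of "final diff ≤ 1" is
-- "diff + (number of mismatching positions in the remaining suffixes) ≤ 1"
theorem pvOELoop_eq_len (a b : List Char) (hab : a.length = b.length) :
    ∀ n i diff, i + n = a.length →
      (pvOELoop a b a.length b.length i i diff ≤ 1 ↔
        diff + ((a.drop i).zip (b.drop i)).countP (fun p => p.1 != p.2) ≤ 1) := by
  intro n
  induction n with
  | zero =>
    intro i diff hi
    rw [pvOELoop, dif_neg (by omega)]
    rw [List.drop_of_length_le (by omega : a.length ≤ i),
        List.drop_of_length_le (by omega : b.length ≤ i)]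
    simp only [List.zip_nil_left, List.countP_nil]
    omega
  | succ n ih =>
    intro i diff hi
    have hia : i < a.length := by omega
    have hib : i < b.length := by omega
    by_cases hd : diff ≤ 1
    · rw [pvOELoop, dif_pos ⟨hia, hib, hd⟩]
      rw [List.drop_eq_getElem_cons hia, List.drop_eq_getElem_cons hib, List.zip_cons_cons]
      simp only [List.getElem?_eq_getElem hia, List.getElem?_eq_getElem hib, beq_iff_eq,
        Option.some.injEq]
      by_cases he : a[i] = b[i]
      · rw [if_pos (by simp [he])]
        rw [ih (i+1) diff (by omega)]
        simp [he]
      · rw [if_neg (by simp [he]), if_pos (by simp [hab])]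
        rw [ih (i+1) (diff+1) (by omega)]
        simp only [List.countP_cons, bne_iff_ne, ne_eq, he, not_false_eq_true,
          if_true]
        omega
    · rw [pvOELoop, dif_neg (by omega)]
      omega

-- second phase of A's loop on strings of lengths differing by one, after the single
-- skip (diff = 1, remaining suffixes of equal length): succeeds iff the suffixes are equal
theorem pvOELoop_ins_phase2 (a b : List Char) (hlen : b.length = a.length + 1) :
    ∀ n i j, i + n = a.length → j + n = b.length →
      (pvOELoop a b a.length b.length i j 1 ≤ 1 ↔ a.drop i = b.drop j) := by
  intro n
  induction n with
  | zero =>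
    intro i j hi hj
    rw [pvOELoop, dif_neg (by omega)]
    rw [List.drop_of_length_le (by omega : a.length ≤ i),
        List.drop_of_length_le (by omega : b.length ≤ j)]
    simp
    omega
  | succ n ih =>
    intro i j hi hj
    have hia : i < a.length := by omega
    have hjb : j < b.length := by omega
    rw [pvOELoop, dif_pos ⟨hia, hjb, by omega⟩]
    rw [List.drop_eq_getElem_cons hia, List.drop_eq_getElem_cons hjb]
    simp only [List.getElem?_eq_getElem hia, List.getElem?_eq_getElem hjb, beq_iff_eq,
      Option.some.injEq]
    by_cases he : a[i] = b[j]
    · rw [if_pos he]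
      rw [ih (i+1) (j+1) (by omega) (by omega)]
      simp only [List.cons_eq_cons, he, true_and]
    · rw [if_neg he, if_neg (by omega : ¬ a.length = b.length)]
      rw [pvOELoop, dif_neg (by omega)]
      constructor
      · intro h; omega
      · intro h
        exact absurd (List.cons_eq_cons.mp h).1 he

-- first phase of A's loop on strings of lengths differing by one: equals B's pvInsCheck
theorem pvOELoop_ins_phase1 (a b : List Char) (hlen : b.length = a.length + 1) :
    ∀ n i, i + n = a.length →
      (pvOELoop a b a.length b.length i i 0 ≤ 1 ↔ pvInsCheck (a.drop i) (b.drop i) = true) := by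
  intro n
  induction n with
  | zero =>
    intro i hi
    rw [pvOELoop, dif_neg (by omega)]
    have ha : a.drop i = [] := List.drop_of_length_le (by omega)
    have hb : b.drop i = [b[i]'(by omega)] := by
      have h1 : i < b.length := by omega
      rw [List.drop_eq_getElem_cons h1]
      rw [List.drop_of_length_le (by omega)]
    rw [ha, hb]
    simp [pvInsCheck]
    omega
  | succ n ih =>
    intro i hi
    have hia : i < a.length := by omega
    have hib : i < b.length := by omega
    rw [pvOELoop, dif_pos ⟨hia, hib, by omega⟩]
    simp only [List.getElem?_eq_getElem hia, List.getElem?_eq_getElem hib, beq_iff_eq,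
      Option.some.injEq]
    by_cases he : a[i] = b[i]
    · rw [if_pos he]
      rw [ih (i+1) (by omega)]
      rw [List.drop_eq_getElem_cons hia, List.drop_eq_getElem_cons hib]
      simp only [pvInsCheck, if_pos he]
    · rw [if_neg he, if_neg (by omega : ¬ a.length = b.length)]
      rw [pvOELoop_ins_phase2 a b hlen (a.length - i) i (i+1) (by omega) (by omega)]
      rw [List.drop_eq_getElem_cons hia, List.drop_eq_getElem_cons hib]
      simp only [pvInsCheck, if_neg he, beq_iff_eq]

-- A's one-edit test equals B's one-edit test
theorem one_edit_eq (s w : String) : one_edit_apart s w = pvOneEditB s.toList w.toList := by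
  unfold one_edit_apart pvOneEditB
  dsimp only
  set a := s.toList
  set b := w.toList
  rcases lt_trichotomy a.length b.length with h | h | h
  · -- a shorter than b
    rw [if_neg (by omega : ¬ a.length = b.length), if_neg (by omega : ¬ a.length > b.length)]
    by_cases h1 : a.length + 1 = b.length
    · rw [if_neg (by omega), if_neg (by omega : ¬ a.length > b.length), if_pos h1]
      have := pvOELoop_ins_phase1 a b (by omega) a.length 0 (by omega)
      simp only [List.drop_zero] at this
      rw [Bool.eq_iff_iff]
      simp only [decide_eq_true_eq]
      rw [this]
    · rw [if_pos (by omega), if_neg (by omega : ¬ a.length > b.length), if_neg h1]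
  · -- equal lengths
    rw [if_neg (by omega), if_neg (by omega : ¬ a.length > b.length), if_pos h]
    have := pvOELoop_eq_len a b h a.length 0 0 (by omega)
    simp only [List.drop_zero] at this
    rw [Bool.eq_iff_iff]
    simp only [decide_eq_true_eq]
    omega
  · -- a longer than b
    rw [if_neg (by omega : ¬ a.length = b.length), if_pos (by omega : a.length > b.length)]
    by_cases h1 : b.length + 1 = a.length
    · rw [if_neg (by omega), if_pos (by omega : a.length > b.length), if_pos h1]
      have := pvOELoop_ins_phase1 b a (by omega) b.length 0 (by omega)
      simp only [List.drop_zero] at this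
      rw [Bool.eq_iff_iff]
      simp only [decide_eq_true_eq]
      rw [this]
    · rw [if_pos (by omega), if_pos (by omega : a.length > b.length), if_neg h1]

-- one_edit_apart can only be true when the lengths differ by at most 1
theorem one_edit_len (s w : String) (h : one_edit_apart s w = true) :
    ((s.toList.length : Int) - (w.toList.length : Int)).natAbs ≤ 1 := by
  unfold one_edit_apart at h
  dsimp only at h
  by_cases hc : ((s.toList.length : Int) - (w.toList.length : Int)).natAbs > 1
  · rw [if_pos hc] at h
    exact absurd h (by simp)
  · omega

-- tokens.any distributes over ||
theorem any_or_distrib (l : List String) (f g : String → Bool) :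
    l.any (fun x => f x || g x) = (l.any f || l.any g) := by
  induction l with
  | nil => rfl
  | cons x l ih =>
    simp [List.any_cons, ih]
    ac_rfl

-- A's cand_by_len bucket for a given length L is just the vset entries of that length
theorem bucket_getD (vset : List String) (L : Int) :
    ((vset.foldl (fun d w => d.modify ((w.toList.length : Int)) [] (fun l => l ++ [w]))
        PySem.Dict.empty).getD L [])
      = vset.filter (fun w => ((w.toList.length : Int)) == L) := by
  have h1 : vset.foldl (fun d w => d.modify ((w.toList.length : Int)) [] (fun l => l ++ [w]))
        PySem.Dict.empty
      = (vset.map (fun w => (((w.toList.length : Int)), w))).foldl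
          (fun d p => d.modify p.1 [] (fun l => l ++ [p.2])) PySem.Dict.empty := by
    rw [List.foldl_map]
  rw [h1, PySem.Dict.getD_foldl_modify_append]
  rw [PySem.Dict.getD_empty]
  rw [List.filter_map]
  simp [Function.comp_def]

-- A's fuzzy pass for one token (over the three buckets) equals B's fuzzy pass
theorem token_fuzzy_eq (vset : List String) (t : String) :
    (if t.toList.length < 3 then false
     else [((t.toList.length : Int)) - 1, ((t.toList.length : Int)), ((t.toList.length : Int)) + 1].any
        (fun L => (vset.filter (fun w => ((w.toList.length : Int)) == L)).any
          (fun w => one_edit_apart t w)))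
  = (decide (3 ≤ t.toList.length) && vset.any (fun w => pvOneEditB t.toList w.toList)) := by
  by_cases h3 : t.toList.length < 3
  · rw [if_pos h3]
    rw [show (decide (3 ≤ t.toList.length)) = false from by
      rw [decide_eq_false_iff_not]; omega]
    rw [Bool.false_and]
  · rw [if_neg h3]
    rw [show (decide (3 ≤ t.toList.length)) = true from by
      rw [decide_eq_true_eq]; omega]
    rw [Bool.true_and]
    have hoe : ∀ w, pvOneEditB t.toList w.toList = one_edit_apart t w :=
      fun w => (one_edit_eq t w).symm
    simp only [hoe]
    rw [Bool.eq_iff_iff]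
    simp only [List.any_eq_true, List.any_filter, List.mem_cons,
      Bool.and_eq_true, beq_iff_eq]
    constructor
    · rintro ⟨L, _, w, hw, _, hoe'⟩
      exact ⟨w, hw, hoe'⟩
    · rintro ⟨w, hw, hoe'⟩
      have hlen := one_edit_len t w hoe'
      refine ⟨((w.toList.length : Int)), by omega, w, hw, rfl, hoe'⟩

-- ===== VERDICT (by name: the statement is the Claim_ definition above) =====
theorem has_fuzzy_verlan_spec : Claim_equal_has_fuzzy_verlan := by
  intro tokens vset max_edit _
  unfold Spec_has_fuzzy_verlan has_fuzzy_verlan has_fuzzy_verlan_alt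
  by_cases ht : tokens.isEmpty
  · simp only [List.isEmpty_iff.mp ht]
    simp
  by_cases hv : vset.isEmpty
  · simp only [List.isEmpty_iff.mp hv]
    simp
  rw [if_neg (by simp [ht, hv])]
  dsimp only
  simp only [bucket_getD, token_fuzzy_eq]
  rw [any_or_distrib]
  by_cases he : tokens.any (fun t => vset.contains t)
  · rw [if_pos he, he, Bool.true_or]
  · rw [if_neg he, (Bool.not_eq_true _).mp he, Bool.false_or]
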